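-- pv_equiv track=rewrite | github.com/QuangPhung15/CompetitiveProgramming | codeforce/800/Following Directions.py | solve
-- ===== SOURCE A (Python) =====
-- def solve(n, s):
-- 	x, y = 0, 0
--
-- 	for c in s:
-- 		if (c == "U"):
-- 			y += 1
-- 		elif (c == "D"):
-- 			y -= 1
-- 		elif (c == "R"):
-- 			x += 1
-- 		else:
-- 			x -= 1
--
-- 		if (x == 1 and y == 1):
-- 			return "YES"
--
-- 	return "NO"
-- ===== SOURCE B (Python) =====
-- def solve(n, s):
--     # Position after k steps is determined by the letter counts of the k-prefix:
--     # x = #R - #other, y = #U - #D.  Stage 1 materializes the per-prefix counts;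
--     # stage 2 scans for a prefix satisfying the closed-form condition.
--     counts = []
--     u = d = r = 0
--     for c in s:
--         u += c == 'U'
--         d += c == 'D'
--         r += c == 'R'
--         counts.append((u, d, r))
--     for k in range(1, len(counts) + 1):
--         u, d, r = counts[k - 1]
--         if u - d == 1 and r - (k - u - d - r) == 1:
--             return "YES"
--     return "NO"
-- ===== Notes on version B (the rewrite author's own statement) =====
-- stated objective: alternative
-- what changed: B keeps no (x,y) position: it characterizes the position after k steps by the letter counts of the k-prefix (x = #R - #other, y = #U - #D), materializes those counts in a first pass, and a second pass scans for a prefix meeting the closed-form condition; A simulates coordinates with an in-loop early return.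
import Mathlib
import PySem

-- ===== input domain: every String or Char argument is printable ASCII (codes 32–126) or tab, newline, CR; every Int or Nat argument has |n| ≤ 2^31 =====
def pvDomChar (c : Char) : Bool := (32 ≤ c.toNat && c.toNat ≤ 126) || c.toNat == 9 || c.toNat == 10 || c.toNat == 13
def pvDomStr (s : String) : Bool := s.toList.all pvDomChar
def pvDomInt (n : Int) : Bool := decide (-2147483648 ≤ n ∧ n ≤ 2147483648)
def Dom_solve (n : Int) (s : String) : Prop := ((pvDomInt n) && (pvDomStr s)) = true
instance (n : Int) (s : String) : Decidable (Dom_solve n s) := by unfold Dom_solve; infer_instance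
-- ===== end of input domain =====

-- ===== PORT A =====
-- B checks prefixes by counting letters instead of tracking a running position; alternative decomposition, not faster.
def solveGo : List Char → Int → Int → String
  | [], _, _ => "NO"
  | c :: cs, x, y =>
    let p : Int × Int :=
      if c = 'U' then (x, y + 1)
      else if c = 'D' then (x, y - 1)
      else if c = 'R' then (x + 1, y)
      else (x - 1, y)
    if p.1 = 1 ∧ p.2 = 1 then "YES" else solveGo cs p.1 p.2

def solve (n : Int) (s : String) : String := solveGo s.toList 0 0

-- ===== PORT B =====
-- stage 1: per-prefix letter counts (u, d, r) accumulated over the string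
def solveAltCounts : List Char → Int → Int → Int → List (Int × Int × Int)
  | [], _, _, _ => []
  | c :: cs, u, d, r =>
    let u' := u + (if c = 'U' then 1 else 0)
    let d' := d + (if c = 'D' then 1 else 0)
    let r' := r + (if c = 'R' then 1 else 0)
    (u', d', r') :: solveAltCounts cs u' d' r'

-- stage 2: scan k = 1 .. len for a prefix meeting the closed-form condition
def solveAltScan (counts : List (Int × Int × Int)) : List Int → String
  | [] => "NO"
  | k :: ks =>
    let t := PySem.List.pyGetD counts (k - 1) (0, 0, 0)
    if t.1 - t.2.1 = 1 ∧ t.2.2 - (k - t.1 - t.2.1 - t.2.2) = 1 then "YES"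
    else solveAltScan counts ks

def solve_alt (n : Int) (s : String) : String :=
  let counts := solveAltCounts s.toList 0 0 0
  solveAltScan counts (PySem.List.pyRange 1 ((counts.length : Int) + 1) 1)

-- ===== PRECONDITION & SPEC =====
def Spec_solve (n : Int) (s : String) (out : String) : Prop := out = solve_alt n s
instance (n : Int) (s : String) (out : String) : Decidable (Spec_solve n s out) := by unfold Spec_solve; infer_instance

-- ===== CLAIM (what is proved, stated in full; the proofs are below) =====
def Claim_equal_solve : Prop := ∀ (n : Int) (s : String), Dom_solve n s → Spec_solve n s (solve n s)

-- ===== LEMMAS AND PROOFS =====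

-- x-coordinate after walking `pre`, expressed through letter counts (B's characterization)
def posX (pre : List Char) : Int :=
  (pre.count 'R' : Int) - ((pre.length : Int) - (pre.count 'U' : Int) - (pre.count 'D' : Int) - (pre.count 'R' : Int))

def posY (pre : List Char) : Int := (pre.count 'U' : Int) - (pre.count 'D' : Int)

theorem pos_step (c : Char) (pre : List Char) :
    (if c = 'U' then (posX pre, posY pre + 1)
     else if c = 'D' then (posX pre, posY pre - 1)
     else if c = 'R' then (posX pre + 1, posY pre)
     else (posX pre - 1, posY pre)) = (posX (pre ++ [c]), posY (pre ++ [c])) := by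
  by_cases hU : c = 'U' <;> by_cases hD : c = 'D' <;> by_cases hR : c = 'R' <;>
    subst_vars <;>
    simp_all [posX, posY, List.count_append, Prod.ext_iff] <;> first | tauto | omega

theorem counts_length (cs : List Char) (u d r : Int) :
    (solveAltCounts cs u d r).length = cs.length := by
  induction cs generalizing u d r with
  | nil => simp [solveAltCounts]
  | cons c cs ih => simp [solveAltCounts, ih]

theorem counts_getElem? (cs : List Char) (u d r : Int) (j : Nat) (hj : j < cs.length) :
    (solveAltCounts cs u d r)[j]? =
      some (u + ((cs.take (j + 1)).count 'U' : Int),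
            d + ((cs.take (j + 1)).count 'D' : Int),
            r + ((cs.take (j + 1)).count 'R' : Int)) := by
  induction cs generalizing u d r j with
  | nil => simp at hj
  | cons c cs ih =>
    cases j with
    | zero =>
      by_cases hU : c = 'U' <;> by_cases hD : c = 'D' <;> by_cases hR : c = 'R' <;>
        subst_vars <;> simp_all [solveAltCounts]
    | succ j =>
      have hj' : j < cs.length := by simpa using hj
      rw [solveAltCounts]
      simp only [List.getElem?_cons_succ, ih _ _ _ j hj', List.take_succ_cons,
        List.count_cons]
      by_cases hU : c = 'U' <;> by_cases hD : c = 'D' <;> by_cases hR : c = 'R' <;>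
        subst_vars <;> simp_all <;> ring

theorem go_eq (t pre : List Char) :
    solveGo t (posX pre) (posY pre) =
      solveAltScan (solveAltCounts (pre ++ t) 0 0 0)
        (PySem.List.pyRange ((pre.length : Int) + 1) ((pre.length : Int) + (t.length : Int) + 1) 1) := by
  induction t generalizing pre with
  | nil =>
    simp only [List.length_nil, Nat.cast_zero, add_zero]
    rw [PySem.List.pyRange_one_eq_nil le_rfl]
    simp [solveGo, solveAltScan]
  | cons c t ih =>
    simp only [List.length_cons]
    rw [PySem.List.pyRange_one_cons (by push_cast; omega)]
    rw [solveGo, solveAltScan]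
    rw [pos_step c pre]
    have hget : PySem.List.pyGetD (solveAltCounts (pre ++ c :: t) 0 0 0)
        (((pre.length : Int) + 1) - 1) (0, 0, 0) =
        (((pre ++ [c]).count 'U' : Int), ((pre ++ [c]).count 'D' : Int), ((pre ++ [c]).count 'R' : Int)) := by
      have h1 : ((pre.length : Int) + 1) - 1 = ((pre.length : Nat) : Int) := by ring
      rw [h1, PySem.List.pyGetD_natCast]
      have hlt : pre.length < (pre ++ c :: t).length := by simp
      rw [List.getD_eq_getElem?_getD, counts_getElem? _ _ _ _ _ hlt]
      have htake : (pre ++ c :: t).take (pre.length + 1) = pre ++ [c] := by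
        simp [List.take_append]
      simp [htake]
    rw [hget]
    have hcond :
        (((pre ++ [c]).count 'U' : Int), ((pre ++ [c]).count 'D' : Int), ((pre ++ [c]).count 'R' : Int)).1 -
            (((pre ++ [c]).count 'U' : Int), ((pre ++ [c]).count 'D' : Int), ((pre ++ [c]).count 'R' : Int)).2.1 = 1 ∧
          (((pre ++ [c]).count 'U' : Int), ((pre ++ [c]).count 'D' : Int), ((pre ++ [c]).count 'R' : Int)).2.2 -
              (((pre.length : Int) + 1) -
                  (((pre ++ [c]).count 'U' : Int), ((pre ++ [c]).count 'D' : Int), ((pre ++ [c]).count 'R' : Int)).1 -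
                  (((pre ++ [c]).count 'U' : Int), ((pre ++ [c]).count 'D' : Int), ((pre ++ [c]).count 'R' : Int)).2.1 -
                  (((pre ++ [c]).count 'U' : Int), ((pre ++ [c]).count 'D' : Int), ((pre ++ [c]).count 'R' : Int)).2.2) = 1
          ↔ posX (pre ++ [c]) = 1 ∧ posY (pre ++ [c]) = 1 := by
      unfold posX posY
      have hlen : ((pre ++ [c]).length : Int) = (pre.length : Int) + 1 := by simp
      rw [hlen]
      tauto
    by_cases h : posX (pre ++ [c]) = 1 ∧ posY (pre ++ [c]) = 1
    · rw [if_pos (show ((posX (pre ++ [c]), posY (pre ++ [c])) : Int × Int).1 = 1 ∧ ((posX (pre ++ [c]), posY (pre ++ [c])) : Int × Int).2 = 1 from ⟨h.1, h.2⟩),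
        if_pos (hcond.mpr h)]
    · rw [if_neg (by simpa using h), if_neg (by rw [hcond]; exact h)]
      have := ih (pre ++ [c])
      simpa [List.append_assoc, add_assoc, add_comm, add_left_comm] using this

-- ===== VERDICT (by name: the statement is the Claim_ definition above) =====
theorem solve_spec : Claim_equal_solve := by
  intro n s _
  unfold Spec_solve solve solve_alt
  simp only [counts_length]
  have := go_eq s.toList []
  simpa [posX, posY] using this
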